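-- pv_equiv track=rewrite | github.com/aDotInTheVoid/wacc.wacc | py/gen_trie.py | pick_mid_counds
-- ===== SOURCE A (Python) =====
-- def _deltas():
--     yield 0
--     i = 1
--     while True:
--         yield i
--         yield -i
--         i = i + 1
--
-- def pick_mid_counds(diffs: list[str]) -> int:
--     assert len(set(diffs)) > 1
--     best_mid = len(diffs) // 2
--
--     for d in _deltas():
--         mid = best_mid + d
--         lo_boundry = diffs[mid - 1]
--         hi_boundry = diffs[mid]
--         if lo_boundry != hi_boundry:
--             return mid
--     raise Exception(f"Could not find midpoint of {diffs}")
-- ===== SOURCE B (Python) =====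
-- def pick_mid_counds(diffs: list[str]) -> int:
--     assert len(set(diffs)) > 1
--     best_mid = len(diffs) // 2
--     boundaries = [i for i in range(1, len(diffs)) if diffs[i - 1] != diffs[i]]
--     return min(boundaries, key=lambda i: (abs(i - best_mid), -i))
-- ===== Notes on version B (the rewrite author's own statement) =====
-- stated objective: alternative
-- what changed: Replaces A's outward-scanning infinite generator (testing best_mid+0,+1,-1,+2,-2,... with early return) by one forward pass that collects all boundary indices and a min() selection with key (abs(i-best_mid), -i), which realises the same 'nearest boundary to the centre, ties toward the larger index' rule.
import Mathlib
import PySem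

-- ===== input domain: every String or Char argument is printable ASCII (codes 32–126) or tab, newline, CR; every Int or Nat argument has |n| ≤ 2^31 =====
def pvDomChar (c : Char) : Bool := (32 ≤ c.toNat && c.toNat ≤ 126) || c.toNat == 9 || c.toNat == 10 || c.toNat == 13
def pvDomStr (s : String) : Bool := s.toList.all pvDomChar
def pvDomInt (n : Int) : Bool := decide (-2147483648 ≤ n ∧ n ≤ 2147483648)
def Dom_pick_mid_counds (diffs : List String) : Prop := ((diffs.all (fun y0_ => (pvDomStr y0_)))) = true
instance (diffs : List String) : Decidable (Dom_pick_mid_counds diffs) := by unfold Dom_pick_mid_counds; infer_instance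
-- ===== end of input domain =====

-- B replaces A's outward-scanning infinite generator by one forward pass collecting all
-- boundary indices and a min() selection with key (abs(i-best_mid), -i); same cost class,
-- different decomposition ("alternative").

-- ===== PORT A =====
-- One probe of A's loop body at index `mid`: `some mid` = boundary found (return mid),
-- `none` = the two neighbours are equal (continue). A Python IndexError (pyGet? = none)
-- is rendered as `some 0` — unreachable on Pre_ inputs, where A never raises IndexError.
def pickAStep (diffs : List String) (mid : Int) : Option Int :=
  match PySem.List.pyGet? diffs (mid - 1), PySem.List.pyGet? diffs mid with
  | some lo, some hi => if lo ≠ hi then some mid else none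
  | _, _ => some 0

-- A's `for d in _deltas()` after the d = 0 yield: tests bm+i then bm-i, i = 1, 2, ….
-- The fuel bounds the infinite generator; exhaustion returns 0, unreachable on Pre_ inputs.
def pickALoop (diffs : List String) (bm : Int) : Nat → Int → Int
  | 0, _ => 0
  | fuel + 1, i =>
    match pickAStep diffs (bm + i) with
    | some r => r
    | none =>
      match pickAStep diffs (bm - i) with
      | some r => r
      | none => pickALoop diffs bm fuel (i + 1)

def pick_mid_counds (diffs : List String) : Int :=
  if (PySem.Set.ofList diffs).len ≤ 1 then 0   -- assert fails: AssertionError (outside Pre_)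
  else
    let bm := PySem.Int.floordiv (diffs.length : Int) 2
    match pickAStep diffs bm with               -- the d = 0 yield of _deltas()
    | some r => r
    | none => pickALoop diffs bm (diffs.length + 1) 1

-- ===== PORT B =====
def pick_mid_counds_alt (diffs : List String) : Int :=
  if (PySem.Set.ofList diffs).len ≤ 1 then 0   -- assert fails: AssertionError (outside Pre_)
  else
    let bm := PySem.Int.floordiv (diffs.length : Int) 2
    let boundaries := (PySem.List.pyRange 1 (diffs.length : Int) 1).filter
      (fun i => decide (PySem.List.pyGet? diffs (i - 1) ≠ PySem.List.pyGet? diffs i))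
    match PySem.List.min2? boundaries (fun i => (i - bm).natAbs) (fun i : Int => -i) with
    | some r => r
    | none => 0                                 -- min() of []: ValueError (outside Pre_)

-- ===== PRECONDITION & SPEC =====
-- Pre_ excludes exactly the inputs on which A's `assert len(set(diffs)) > 1` fails
-- (AssertionError): lists with fewer than two distinct elements.
def Pre_pick_mid_counds (diffs : List String) : Prop := 1 < (PySem.Set.ofList diffs).len
instance (diffs : List String) : Decidable (Pre_pick_mid_counds diffs) := by
  unfold Pre_pick_mid_counds; infer_instance

def pvWitness_pick_mid_counds : List String := ["a", "b"]

def Spec_pick_mid_counds (diffs : List String) (out : Int) : Prop := out = pick_mid_counds_alt diffs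
instance (diffs : List String) (out : Int) : Decidable (Spec_pick_mid_counds diffs out) := by unfold Spec_pick_mid_counds; infer_instance

-- ===== CLAIM (what is proved, stated in full; the proofs are below) =====
def Claim_equal_pick_mid_counds : Prop := ∀ (diffs : List String), Dom_pick_mid_counds diffs → Pre_pick_mid_counds diffs → Spec_pick_mid_counds diffs (pick_mid_counds diffs)

-- ===== LEMMAS AND PROOFS =====

-- j is a boundary: 1 ≤ j < len and diffs[j-1] ≠ diffs[j]
def pvBdry (diffs : List String) (j : Int) : Prop :=
  1 ≤ j ∧ j < (diffs.length : Int) ∧ PySem.List.pyGet? diffs (j - 1) ≠ PySem.List.pyGet? diffs j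

-- A's delta order prefers x over y: strictly closer to bm, or equally close and larger
def pvBeats (bm x y : Int) : Prop :=
  (x - bm).natAbs < (y - bm).natAbs ∨ ((x - bm).natAbs = (y - bm).natAbs ∧ y < x)

lemma pvMin2Step (bm b x : Int) (xs : List Int) :
    PySem.List.min2? (b :: x :: xs) (fun i => (i - bm).natAbs) (fun i : Int => -i)
    = PySem.List.min2?
        ((if (x - bm).natAbs < (b - bm).natAbs ∨ ((x - bm).natAbs = (b - bm).natAbs ∧ b < x)
          then x else b) :: xs)
        (fun i => (i - bm).natAbs) (fun i : Int => -i) := by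
  simp only [PySem.List.min2?, List.foldl]
  by_cases h : (x - bm).natAbs < (b - bm).natAbs ∨ ((x - bm).natAbs = (b - bm).natAbs ∧ b < x)
  · rw [if_pos h]
    have hb : (decide ((x - bm).natAbs < (b - bm).natAbs) ||
        (!decide ((b - bm).natAbs < (x - bm).natAbs) && decide (-x < -b))) = true := by
      simp only [Bool.or_eq_true, Bool.and_eq_true, Bool.not_eq_true', decide_eq_true_eq,
        decide_eq_false_iff_not]
      rcases h with h | ⟨h1, h2⟩ <;> omega
    rw [hb]; simp
  · rw [if_neg h]
    have hb : (decide ((x - bm).natAbs < (b - bm).natAbs) ||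
        (!decide ((b - bm).natAbs < (x - bm).natAbs) && decide (-x < -b))) = false := by
      simp only [Bool.or_eq_false_iff, Bool.and_eq_false_iff, Bool.not_eq_false',
        decide_eq_false_iff_not, decide_eq_true_eq]
      constructor
      · intro hlt; exact h (Or.inl hlt)
      · by_cases h1 : (b - bm).natAbs < (x - bm).natAbs
        · exact Or.inl h1
        · refine Or.inr ?_
          intro h2
          exact h (Or.inr ⟨by omega, by omega⟩)
    rw [hb]; simp

lemma pvMin2Exists (bm : Int) (xs : List Int) : ∀ (b : Int),
    ∃ m, PySem.List.min2? (b :: xs) (fun i => (i - bm).natAbs) (fun i : Int => -i) = some m := by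
  induction xs with
  | nil => intro b; exact ⟨b, by simp [PySem.List.min2?]⟩
  | cons x xs ih =>
    intro b
    rw [pvMin2Step]
    exact ih _

lemma pvMin2Best (bm : Int) (xs : List Int) : ∀ (b m : Int),
    PySem.List.min2? (b :: xs) (fun i => (i - bm).natAbs) (fun i : Int => -i) = some m →
    (m = b ∨ m ∈ xs) ∧ ∀ y, (y = b ∨ y ∈ xs) → y ≠ m → pvBeats bm m y := by
  induction xs with
  | nil =>
    intro b m h
    simp [PySem.List.min2?] at h
    subst h
    refine ⟨Or.inl rfl, ?_⟩
    rintro y (rfl | hy) hne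
    · exact absurd rfl hne
    · simp at hy
  | cons x xs ih =>
    intro b m h
    rw [pvMin2Step] at h
    by_cases hc : (x - bm).natAbs < (b - bm).natAbs ∨ ((x - bm).natAbs = (b - bm).natAbs ∧ b < x)
    · rw [if_pos hc] at h
      obtain ⟨hmem, hbest⟩ := ih x m h
      constructor
      · rcases hmem with rfl | hm
        · exact Or.inr (List.mem_cons_self)
        · exact Or.inr (List.mem_cons_of_mem _ hm)
      · rintro y (rfl | hy) hne
        · -- y = b, the loser of the first comparison: m beats x (or m = x) and x beats b
          by_cases hmx : m = x
          · subst hmx; exact hc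
          · have h1 := hbest x (Or.inl rfl) (Ne.symm hmx)
            unfold pvBeats at h1 ⊢
            rcases h1 with h1 | ⟨h1a, h1b⟩ <;> rcases hc with hc | ⟨hca, hcb⟩ <;> omega
        · exact hbest y (by simpa using hy) hne
    · rw [if_neg hc] at h
      obtain ⟨hmem, hbest⟩ := ih b m h
      constructor
      · rcases hmem with rfl | hm
        · exact Or.inl rfl
        · exact Or.inr (List.mem_cons_of_mem _ hm)
      · rintro y (rfl | hy) hne
        · exact hbest y (Or.inl rfl) hne
        · rcases List.mem_cons.mp hy with rfl | hy'
          · -- y = x, the loser: ¬ pvBeats bm x b, so b beats x (or b = x), and m beats b (or m = b)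
            by_cases hxb : y = b
            · rw [hxb]; exact hbest b (Or.inl rfl) (hxb ▸ hne)
            · have hbx : pvBeats bm b y := by
                unfold pvBeats
                by_cases h1 : (y - bm).natAbs < (b - bm).natAbs
                · exact absurd (Or.inl h1) hc
                · by_cases h2 : (b - bm).natAbs < (y - bm).natAbs
                  · exact Or.inl h2
                  · refine Or.inr ⟨by omega, ?_⟩
                    rcases lt_trichotomy y b with h3 | h3 | h3
                    · exact h3
                    · exact absurd h3 hxb
                    · exact absurd (Or.inr ⟨by omega, h3⟩) hc
              by_cases hmb : m = b
              · exact hmb ▸ hbx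
              · have h1 := hbest b (Or.inl rfl) (Ne.symm hmb)
                unfold pvBeats at h1 hbx ⊢
                rcases h1 with h1 | ⟨h1a, h1b⟩ <;> rcases hbx with h2 | ⟨h2a, h2b⟩ <;> omega
          · exact hbest y (Or.inr hy') hne

-- the comprehension in B collects exactly the boundary indices
lemma pvMemBoundaries (diffs : List String) (j : Int) :
    j ∈ (PySem.List.pyRange 1 (diffs.length : Int) 1).filter
        (fun i => decide (PySem.List.pyGet? diffs (i - 1) ≠ PySem.List.pyGet? diffs i))
      ↔ pvBdry diffs j := by
  simp only [List.mem_filter, PySem.List.mem_pyRange_one, decide_eq_true_eq, pvBdry]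
  tauto

-- a list with more than one distinct element has two unequal adjacent elements
lemma pvExistsBdry (diffs : List String) (h : 1 < (PySem.Set.ofList diffs).len) :
    ∃ j, pvBdry diffs j := by
  by_contra hno
  -- all adjacent pairs are equal
  have hadj : ∀ k : Nat, (hk : k + 1 < diffs.length) → diffs[k]'(by omega) = diffs[k + 1]'(by omega) := by
    intro k hk
    by_contra hne
    apply hno
    have h1 : PySem.List.pyGet? diffs ((k : Int) + 1 - 1) = some (diffs[k]'(by omega)) := by
      rw [show (k : Int) + 1 - 1 = ((k : Nat) : Int) by ring]
      rw [PySem.List.pyGet?_eq_some_getElem diffs (by omega) (by omega)]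
      simp
    have h2 : PySem.List.pyGet? diffs ((k : Int) + 1) = some (diffs[k + 1]'(by omega)) := by
      rw [show (k : Int) + 1 = ((k + 1 : Nat) : Int) by push_cast; ring]
      rw [PySem.List.pyGet?_eq_some_getElem diffs (by omega) (by omega)]
      simp
    refine ⟨(k : Int) + 1, by omega, by omega, ?_⟩
    rw [h1, h2]
    exact fun hc => hne (Option.some.inj hc)
  -- hence every element equals the first
  have hall : ∀ k : Nat, (hk : k < diffs.length) → diffs[k]'hk = diffs[0]'(by omega) := by
    intro k
    induction k with
    | zero => intro hk; rfl
    | succ n ihn => intro hk; rw [← hadj n (by omega)]; exact ihn (by omega)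
  -- but the set has two distinct members
  unfold PySem.Set.len at h
  have hlen : 1 < (PySem.Set.ofList diffs).length := by exact_mod_cast h
  obtain ⟨a, rest, hcons⟩ : ∃ a rest, PySem.Set.ofList diffs = a :: rest := by
    cases hs : PySem.Set.ofList diffs with
    | nil => rw [hs] at hlen; simp at hlen
    | cons a rest => exact ⟨a, rest, rfl⟩
  obtain ⟨c, rest2, hcons2⟩ : ∃ c rest2, rest = c :: rest2 := by
    cases hr : rest with
    | nil => rw [hr] at hcons; rw [hcons] at hlen; simp at hlen
    | cons c r2 => exact ⟨c, r2, rfl⟩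
  have hnd := PySem.Set.nodup_ofList diffs
  rw [hcons, hcons2] at hnd
  have hac : a ≠ c := by
    intro hac; exact (List.nodup_cons.mp hnd).1 (hac ▸ List.mem_cons_self)
  have ha : a ∈ diffs := (PySem.Set.mem_ofList diffs a).mp (hcons ▸ List.mem_cons_self)
  have hc : c ∈ diffs := (PySem.Set.mem_ofList diffs c).mp
    (hcons ▸ hcons2 ▸ List.mem_cons_of_mem _ List.mem_cons_self)
  obtain ⟨ia, hia, rfl⟩ := List.mem_iff_getElem.mp ha
  obtain ⟨ic, hic, rfl⟩ := List.mem_iff_getElem.mp hc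
  exact hac (by rw [hall ia hia, hall ic hic])

lemma pvStepFound (diffs : List String) (mid : Int) (hB : pvBdry diffs mid) :
    pickAStep diffs mid = some mid := by
  obtain ⟨h1, h2, h3⟩ := hB
  have g1 := PySem.List.pyGet?_eq_some_getElem diffs (i := mid - 1) (by omega) (by omega)
  have g2 := PySem.List.pyGet?_eq_some_getElem diffs (i := mid) (by omega) h2
  rw [g1, g2] at h3
  unfold pickAStep
  rw [g1, g2]
  simp only [ne_eq]
  rw [if_pos (by intro he; exact h3 (by rw [he]))]

lemma pvStepNotFound (diffs : List String) (mid : Int) (h1 : 1 ≤ mid)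
    (h2 : mid < (diffs.length : Int)) (hnb : ¬ pvBdry diffs mid) :
    pickAStep diffs mid = none := by
  have g1 := PySem.List.pyGet?_eq_some_getElem diffs (i := mid - 1) (by omega) (by omega)
  have g2 := PySem.List.pyGet?_eq_some_getElem diffs (i := mid) (by omega) h2
  have heq : diffs[(mid - 1).toNat]'(by omega) = diffs[mid.toNat]'(by omega) := by
    by_contra hne
    exact hnb ⟨h1, h2, by rw [g1, g2]; exact fun hc => hne (Option.some.inj hc)⟩
  unfold pickAStep
  rw [g1, g2]
  simp only [ne_eq]
  rw [if_neg (not_not_intro heq)]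

lemma pvLoopFinds (diffs : List String) (bm m : Int)
    (hbm1 : 2 * bm ≤ (diffs.length : Int))
    (hbm2 : (diffs.length : Int) ≤ 2 * bm + 1)
    (hm : pvBdry diffs m)
    (hbest : ∀ j, pvBdry diffs j → j ≠ m → pvBeats bm m j) :
    ∀ (fuel : Nat) (i : Int), 1 ≤ i → i ≤ ((m - bm).natAbs : Int) →
      ((m - bm).natAbs : Int) < i + fuel →
      pickALoop diffs bm fuel i = m := by
  have hm1 : 1 ≤ m := hm.1
  have hm2 : m < (diffs.length : Int) := hm.2.1
  intro fuel
  induction fuel with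
  | zero => intro i _ h2 h3; omega
  | succ fuel ih =>
    intro i hi1 hi2 hi3
    show (match pickAStep diffs (bm + i) with
      | some r => r
      | none =>
        match pickAStep diffs (bm - i) with
        | some r => r
        | none => pickALoop diffs bm fuel (i + 1)) = m
    by_cases hp : m = bm + i
    · rw [← hp, pvStepFound diffs m hm]
    · have hplus : pickAStep diffs (bm + i) = none := by
        apply pvStepNotFound diffs (bm + i) (by omega) (by omega)
        intro hb
        have := hbest (bm + i) hb (by omega)
        unfold pvBeats at this
        rcases this with h | ⟨ha, hb'⟩ <;> omega
      rw [hplus]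
      by_cases hq : m = bm - i
      · rw [← hq, pvStepFound diffs m hm]
      · have hlt : i < ((m - bm).natAbs : Int) := by omega
        have hminus : pickAStep diffs (bm - i) = none := by
          apply pvStepNotFound diffs (bm - i) (by omega) (by omega)
          intro hb
          have := hbest (bm - i) hb (by omega)
          unfold pvBeats at this
          rcases this with h | ⟨ha, hb'⟩ <;> omega
        rw [hminus]
        exact ih (i + 1) (by omega) (by omega) (by omega)

-- ===== VERDICT (by name: the statement is the Claim_ definition above) =====
theorem pick_mid_counds_spec : Claim_equal_pick_mid_counds := by
  intro diffs _ hpre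
  unfold Pre_pick_mid_counds at hpre
  unfold Spec_pick_mid_counds
  have hif : ¬ ((PySem.Set.ofList diffs).len ≤ 1) := by omega
  -- characterize bm
  have hbmdef : PySem.Int.floordiv (diffs.length : Int) 2 = ((diffs.length / 2 : Nat) : Int) := by
    exact_mod_cast PySem.Int.floordiv_natCast diffs.length 2
  set bm : Int := ((diffs.length / 2 : Nat) : Int) with hbm
  -- a boundary exists, so the list has ≥ 2 elements
  obtain ⟨j0, hj0⟩ := pvExistsBdry diffs hpre
  have hn2 : 2 ≤ diffs.length := by
    have := hj0.1; have := hj0.2.1; omega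
  have hbm0 : 1 ≤ bm := by rw [hbm]; exact_mod_cast Nat.one_le_iff_ne_zero.mpr (by omega)
  have hdiv : 2 * (diffs.length / 2) ≤ diffs.length ∧ diffs.length ≤ 2 * (diffs.length / 2) + 1 := by
    omega
  have hbm1 : 2 * bm ≤ (diffs.length : Int) := by rw [hbm]; exact_mod_cast hdiv.1
  have hbm2 : (diffs.length : Int) ≤ 2 * bm + 1 := by rw [hbm]; exact_mod_cast hdiv.2
  -- B's boundary list is nonempty
  have hj0mem := (pvMemBoundaries diffs j0).mpr hj0
  obtain ⟨b, rest, hcons⟩ : ∃ b rest,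
      (PySem.List.pyRange 1 (diffs.length : Int) 1).filter
        (fun i => decide (PySem.List.pyGet? diffs (i - 1) ≠ PySem.List.pyGet? diffs i))
        = b :: rest := by
    cases hs : (PySem.List.pyRange 1 (diffs.length : Int) 1).filter
        (fun i => decide (PySem.List.pyGet? diffs (i - 1) ≠ PySem.List.pyGet? diffs i)) with
    | nil => rw [hs] at hj0mem; simp at hj0mem
    | cons b rest => exact ⟨b, rest, rfl⟩
  obtain ⟨m, hmin⟩ := pvMin2Exists bm rest b
  obtain ⟨hmmem, hmbest⟩ := pvMin2Best bm rest b m hmin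
  have hmBdry : pvBdry diffs m := by
    apply (pvMemBoundaries diffs m).mp
    rw [hcons]
    rcases hmmem with rfl | hm
    · exact List.mem_cons_self
    · exact List.mem_cons_of_mem _ hm
  have hbest : ∀ j, pvBdry diffs j → j ≠ m → pvBeats bm m j := by
    intro j hj hne
    have hjmem := (pvMemBoundaries diffs j).mpr hj
    rw [hcons] at hjmem
    exact hmbest j (List.mem_cons.mp hjmem) hne
  -- B returns m
  have hRHS : pick_mid_counds_alt diffs = m := by
    unfold pick_mid_counds_alt
    rw [if_neg hif]
    simp only [hbmdef]
    rw [hcons, hmin]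
  rw [hRHS]
  -- A returns m
  unfold pick_mid_counds
  rw [if_neg hif]
  simp only [hbmdef]
  by_cases hm0 : m = bm
  · rw [show pickAStep diffs bm = some m from hm0 ▸ pvStepFound diffs m hmBdry]
  · have hstep0 : pickAStep diffs bm = none := by
      apply pvStepNotFound diffs bm hbm0 (by omega)
      intro hb
      have := hbest bm hb (by omega)
      unfold pvBeats at this
      rcases this with h | ⟨ha, hb'⟩ <;> omega
    rw [hstep0]
    apply pvLoopFinds diffs bm m hbm1 hbm2 hmBdry hbest
    · omega
    · omega
    · have := hmBdry.1; have := hmBdry.2.1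
      omega
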